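-- pv_equiv track=rewrite | github.com/yakimk/lib | src/pb_robustness_measures/sampling_robustness_measure/plurality_sampling_robustness_measure_single_voter.py | count_by_M_T
-- ===== SOURCE A (Python) =====
-- import math
--
-- def f_stars_and_bars(R, k):
--     # number of ways to distribute R identical items into k labeled boxes
--     if R < 0:
--         return 0
--     if k <= 0:
--         return 0 if R != 0 else 1
--     return math.comb(R + k - 1, k - 1)
--
-- def g_count_T_M_r(T_max, M, r):
--     if r == 0:
--        return [0] * (T_max + 1)
--
--     dp0 = [0] * (T_max + 1)  # no M seen
--     dp1 = [0] * (T_max + 1)  # some M seen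
--     dp0[0] = 1
--
--     for _ in range(r):
--         # difference arrays length T_max+2 to support R+1 index
--         diff0 = [0] * (T_max + 2)
--         diff1 = [0] * (T_max + 2)
--
--         def range_add(diff, L, R, val):
--             if L > R or L > T_max:
--                 return
--             if R > T_max:
--                 R = T_max
--             diff[L] += val
--             diff[R + 1] -= val
--
--         for s in range(T_max + 1):
--             v0 = dp0[s]
--             v1 = dp1[s]
--             if v0 == 0 and v1 == 0:
--                 continue
--             # allowed c: 0..min(M, T_max - s)
--             maxc = min(M, T_max - s)
--             low = s
--             high = s + maxc
--             if low <= high: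
--                 if v0:
--                     # add v0 to newdp0[low..high]
--                     range_add(diff0, low, high, v0)
--                     # if M in allowed c-range, move single index s+M from newdp0 to newdp1
--                     if maxc >= M: # means s + M <= T_max
--                         idx = s + M
--                         range_add(diff0, idx, idx, -v0)
--                         range_add(diff1, idx, idx, v0)
--                 if v1:
--                     # add v1 to newdp1[low..high]
--                     range_add(diff1, low, high, v1)
--
--         new0 = [0] * (T_max + 1)
--         new1 = [0] * (T_max + 1)
--         cur = 0
--         for i in range(T_max + 1):
--             cur += diff0[i]
--             new0[i] = cur
--         cur = 0
--         for i in range(T_max + 1):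
--             cur += diff1[i]
--             new1[i] = cur
--
--         dp0, dp1 = new0, new1
--
--     return dp1  # g(T) = dp1[T] for T=0..T_max
--
-- def count_by_M_T(n, N, K_set):
--     k = len(K_set)
--     if k == 0:
--         return 0
--     if k == n:
--         return 0
--
--     r = n - k
--     total = 0
--
--     M_max = (N // k) - 1
--     if M_max < 0:
--         return 0
--
--     for M in range(0, M_max + 1):
--         T_min = M
--         T_max_possible = min(r * M, N - k * (M + 1))
--         if T_max_possible < T_min:
--             continue
--
--         g = g_count_T_M_r(T_max_possible, M, r)
--
--         for T in range(T_min, T_max_possible + 1):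
--             R = N - k * (M + 1) - T
--             if R < 0:
--                 continue
--             f = f_stars_and_bars(R, k)
--             val = f * g[T]
--             total += val
--
--     return total
-- ===== SOURCE B (Python) =====
-- import math
--
-- def bounded_parts(t_hi, cap, parts):
--     # table[T] = number of ways to write T as an ordered sum of `parts` integers in [0, cap]
--     table = [1] + [0] * t_hi
--     for _ in range(max(parts, 0)):
--         prefix = []
--         run = 0
--         for T in range(t_hi + 1):
--             run += table[T]
--             prefix.append(run)
--         table = [prefix[T] - (prefix[T - cap - 1] if T - cap - 1 >= 0 else 0)
--                  for T in range(t_hi + 1)]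
--     return table
--
-- def count_by_M_T(n, N, K_set):
--     k = len(K_set)
--     if k == 0 or k == n:
--         return 0
--     r = n - k
--     M_max = N // k - 1
--     if M_max < 0:
--         return 0
--     total = 0
--     for M in range(M_max + 1):
--         T_hi = min(r * M, N - k * (M + 1))
--         if T_hi < M:
--             continue
--         cm = bounded_parts(T_hi, M, r)
--         cm1 = bounded_parts(T_hi, M - 1, r)
--         for T in range(M, T_hi + 1):
--             R = N - k * (M + 1) - T
--             if R >= 0:
--                 total += math.comb(R + k - 1, k - 1) * (cm[T] - cm1[T])
--     return total
-- ===== Notes on version B (the rewrite author's own statement) =====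
-- stated objective: simpler
-- what changed: Replaces A's two-layer 'seen-the-cap-yet' automaton with difference-array range updates and prefix-sum rebuilds by two plain bounded-composition tables (parts in [0,M] and in [0,M-1]) computed by direct windowed sums, subtracted at the end; the dead R<0 branch is dropped.
import Mathlib
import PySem

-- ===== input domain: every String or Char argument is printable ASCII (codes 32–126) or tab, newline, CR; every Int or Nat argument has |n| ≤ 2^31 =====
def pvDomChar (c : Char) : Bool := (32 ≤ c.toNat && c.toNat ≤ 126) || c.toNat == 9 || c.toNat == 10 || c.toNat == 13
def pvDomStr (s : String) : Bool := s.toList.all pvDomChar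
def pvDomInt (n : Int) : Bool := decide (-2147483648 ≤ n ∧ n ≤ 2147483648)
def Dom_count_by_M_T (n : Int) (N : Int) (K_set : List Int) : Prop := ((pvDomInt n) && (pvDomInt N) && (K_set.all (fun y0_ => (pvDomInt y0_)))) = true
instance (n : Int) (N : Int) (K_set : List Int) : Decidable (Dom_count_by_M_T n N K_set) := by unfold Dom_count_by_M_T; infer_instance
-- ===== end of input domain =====

-- B replaces A's two-layer seen-the-cap automaton with difference-array range updates by two
-- plain bounded-composition tables (caps M and M-1) built by direct windowed sums, subtracted
-- at the end (objective: simpler; not faster).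

-- ===== PORT A =====
def f_stars_and_bars (R : Int) (k : Int) : Int :=
  if R < 0 then 0
  else if k ≤ 0 then (if R ≠ 0 then 0 else 1)
  else ((R + k - 1).toNat.choose (k - 1).toNat : Int)

-- diff[L] += val, exact for the in-range indices A uses (List.modify is the identity out of range)
def pvAddAt (xs : List Int) (i : Nat) (v : Int) : List Int := xs.modify i (· + v)

def rangeAdd (Tmax : Int) (diff : List Int) (L R val : Int) : List Int :=
  if L > R ∨ L > Tmax then diff
  else
    let R' := if R > Tmax then Tmax else R
    pvAddAt (pvAddAt diff L.toNat val) (R' + 1).toNat (-val)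

def gInner (Tmax M : Int) (dp0 dp1 : List Int) (st : List Int × List Int) (s : Nat) :
    List Int × List Int :=
  let v0 := dp0.getD s 0
  let v1 := dp1.getD s 0
  if v0 = 0 ∧ v1 = 0 then st
  else
    let maxc := min M (Tmax - (s : Int))
    let low : Int := (s : Int)
    let high : Int := (s : Int) + maxc
    if low ≤ high then
      let st1 :=
        if v0 ≠ 0 then
          let d0 := rangeAdd Tmax st.1 low high v0
          if maxc ≥ M then
            let idx : Int := (s : Int) + M
            (rangeAdd Tmax d0 idx idx (-v0), rangeAdd Tmax st.2 idx idx v0)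
          else (d0, st.2)
        else st
      if v1 ≠ 0 then (st1.1, rangeAdd Tmax st1.2 low high v1) else st1
    else st

def prefixLoop (Tmax : Int) (diff : List Int) : List Int :=
  ((List.range (Tmax + 1).toNat).foldl
    (fun (acc : List Int × Int) i =>
      let cur := acc.2 + diff.getD i 0
      (acc.1 ++ [cur], cur)) ([], 0)).1

def gRound (Tmax M : Int) (st : List Int × List Int) : List Int × List Int :=
  let init : List Int × List Int :=
    (List.replicate (Tmax + 2).toNat 0, List.replicate (Tmax + 2).toNat 0)
  let d := (List.range (Tmax + 1).toNat).foldl (gInner Tmax M st.1 st.2) init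
  (prefixLoop Tmax d.1, prefixLoop Tmax d.2)

def g_count_T_M_r (Tmax M r : Int) : List Int :=
  if r = 0 then List.replicate (Tmax + 1).toNat 0
  else
    let dp0 := (List.replicate (Tmax + 1).toNat 0).set 0 1
    let dp1 := List.replicate (Tmax + 1).toNat 0
    ((List.range r.toNat).foldl (fun st _ => gRound Tmax M st) (dp0, dp1)).2

def count_by_M_T (n : Int) (N : Int) (K_set : List Int) : Int :=
  let k : Int := K_set.length
  if k = 0 then 0
  else if k = n then 0
  else
    let r := n - k
    let Mmax := PySem.Int.floordiv N k - 1
    if Mmax < 0 then 0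
    else
      (List.range (Mmax + 1).toNat).foldl (fun (total : Int) (Mn : Nat) =>
        let M : Int := (Mn : Int)
        let Tmin := M
        let Tmaxp := min (r * M) (N - k * (M + 1))
        if Tmaxp < Tmin then total
        else
          let g := g_count_T_M_r Tmaxp M r
          (List.range (Tmaxp + 1 - Tmin).toNat).foldl (fun (tot : Int) (i : Nat) =>
            let T := Tmin + (i : Int)
            let R := N - k * (M + 1) - T
            if R < 0 then tot
            else tot + f_stars_and_bars R k * g.getD T.toNat 0) total) 0

-- ===== PORT B =====
-- math.comb on the nonnegative arguments B feeds it
def pyComb (a b : Int) : Int := (a.toNat.choose b.toNat : Int)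

def boundedParts (tHi cap parts : Int) : List Int :=
  (List.range (max parts 0).toNat).foldl
    (fun table _ =>
      let pre := ((List.range (tHi + 1).toNat).foldl
        (fun (acc : List Int × Int) T =>
          (acc.1 ++ [acc.2 + table.getD T 0], acc.2 + table.getD T 0)) ([], 0)).1
      (List.range (tHi + 1).toNat).map (fun (T : Nat) =>
        pre.getD T 0 -
          (if (T : Int) - cap - 1 ≥ 0 then pre.getD ((T : Int) - cap - 1).toNat 0 else 0)))
    (1 :: List.replicate tHi.toNat 0)

def count_by_M_T_alt (n : Int) (N : Int) (K_set : List Int) : Int :=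
  let k : Int := K_set.length
  if k = 0 ∨ k = n then 0
  else
    let r := n - k
    let Mmax := PySem.Int.floordiv N k - 1
    if Mmax < 0 then 0
    else
      (List.range (Mmax + 1).toNat).foldl (fun (total : Int) (Mn : Nat) =>
        let M : Int := (Mn : Int)
        let THi := min (r * M) (N - k * (M + 1))
        if THi < M then total
        else
          let cm := boundedParts THi M r
          let cm1 := boundedParts THi (M - 1) r
          (List.range (THi + 1 - M).toNat).foldl (fun (tot : Int) (i : Nat) =>
            let T := M + (i : Int)
            let R := N - k * (M + 1) - T
            if R ≥ 0 then
              tot + pyComb (R + k - 1) (k - 1) * (cm.getD T.toNat 0 - cm1.getD T.toNat 0)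
            else tot) total) 0

-- ===== PRECONDITION & SPEC =====
def Spec_count_by_M_T (n : Int) (N : Int) (K_set : List Int) (out : Int) : Prop := out = count_by_M_T_alt n N K_set
instance (n : Int) (N : Int) (K_set : List Int) (out : Int) : Decidable (Spec_count_by_M_T n N K_set out) := by unfold Spec_count_by_M_T; infer_instance

-- ===== CLAIM (what is proved, stated in full; the proofs are below) =====
def Claim_equal_count_by_M_T : Prop := ∀ (n : Int) (N : Int) (K_set : List Int), Dom_count_by_M_T n N K_set → Spec_count_by_M_T n N K_set (count_by_M_T n N K_set)


-- ===== LEMMAS AND PROOFS =====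

-- prefix sum of a difference list
def psum (d : List Int) (i : Nat) : Int := ∑ j ∈ Finset.range (i+1), d.getD j 0

-- contribution indicators of A's inner loop at source index s, target index t
def ind1 (Tm cap : Int) (s t : Nat) : Int :=
  if (s:Int) ≤ (t:Int) ∧ (t:Int) ≤ (s:Int) + min cap (Tm - (s:Int)) then 1 else 0
def indJ (Tm M : Int) (s t : Nat) : Int :=
  if min M (Tm - (s:Int)) ≥ M ∧ (t:Int) = (s:Int) + M then 1 else 0

-- mathematical bounded-composition table: j parts, each in [0, cap]
def mathF (cap : Int) : Nat → Nat → Int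
  | 0, t => if t = 0 then 1 else 0
  | (j+1), t => ∑ c ∈ Finset.range ((min cap (t:Int)) + 1).toNat, mathF cap j (t - c)

theorem sum_map_range (n : Nat) (f : Nat → Int) :
    ((List.range n).map f).sum = ∑ i ∈ Finset.range n, f i := by
  induction n with
  | zero => simp
  | succ n ih =>
    rw [List.range_succ, List.map_append, List.sum_append, Finset.sum_range_succ, ih]
    simp

theorem length_pvAddAt (xs : List Int) (i : Nat) (v : Int) :
    (pvAddAt xs i v).length = xs.length := by
  simp [pvAddAt]

theorem getD_pvAddAt (xs : List Int) (i : Nat) (v : Int) (j : Nat) :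
    (pvAddAt xs i v).getD j 0 = xs.getD j 0 + if i = j ∧ j < xs.length then v else 0 := by
  unfold pvAddAt
  rw [List.getD_eq_getElem?_getD, List.getD_eq_getElem?_getD, List.getElem?_modify]
  by_cases hj : j < xs.length
  · rw [List.getElem?_eq_getElem hj]
    by_cases hij : i = j <;> simp [hij, hj]
  · have h0 : xs[j]? = none := List.getElem?_eq_none (by omega)
    by_cases hij : i = j <;> simp [hij, hj, h0]

theorem psum_pvAddAt (xs : List Int) (p : Nat) (v : Int) (i : Nat) :
    psum (pvAddAt xs p v) i = psum xs i + if p ≤ i ∧ p < xs.length then v else 0 := by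
  unfold psum
  simp only [getD_pvAddAt]
  rw [Finset.sum_add_distrib]
  congr 1
  have hrw : ∀ j : Nat, (if p = j ∧ j < xs.length then v else 0)
      = (if j = p then (if j < xs.length then v else 0) else 0) := by
    intro j
    by_cases h1 : j = p
    · subst h1; by_cases h2 : j < xs.length <;> simp [h2]
    · rw [if_neg (fun hc => h1 hc.1.symm), if_neg h1]
  simp only [hrw]
  rw [Finset.sum_ite_eq' (Finset.range (i+1)) p (fun j => if j < xs.length then v else 0)]
  by_cases hp : p ≤ i <;> by_cases hl : p < xs.length <;>
    simp [Finset.mem_range, Nat.lt_succ_iff, hp, hl]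

theorem length_rangeAdd (Tm : Int) (d : List Int) (L R v : Int) :
    (rangeAdd Tm d L R v).length = d.length := by
  unfold rangeAdd
  split
  · rfl
  · simp [length_pvAddAt]

theorem psum_rangeAdd (Tm : Int) (d : List Int) (L R v : Int) (hL : 0 ≤ L)
    (hlen : d.length = (Tm+2).toNat) (hT : 0 ≤ Tm) (i : Nat) (hi : (i:Int) ≤ Tm) :
    psum (rangeAdd Tm d L R v) i
      = psum d i + (if L ≤ (i:Int) ∧ (i:Int) ≤ min R Tm then v else 0) := by
  unfold rangeAdd
  by_cases hg : L > R ∨ L > Tm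
  · rw [if_pos hg, if_neg (by omega)]
    ring
  · rw [if_neg hg]
    rw [psum_pvAddAt, psum_pvAddAt, length_pvAddAt]
    rw [hlen]
    split_ifs <;> omega

set_option maxHeartbeats 2000000 in
theorem gInner_spec (Tm M : Int) (hM : 0 ≤ M) (hT : 0 ≤ Tm)
    (dp0 dp1 : List Int) (st : List Int × List Int)
    (h1 : st.1.length = (Tm+2).toNat) (h2 : st.2.length = (Tm+2).toNat)
    (s : Nat) (hs : (s:Int) ≤ Tm) :
    (gInner Tm M dp0 dp1 st s).1.length = (Tm+2).toNat ∧
    (gInner Tm M dp0 dp1 st s).2.length = (Tm+2).toNat ∧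
    ∀ t : Nat, (t:Int) ≤ Tm →
      psum (gInner Tm M dp0 dp1 st s).1 t
        = psum st.1 t + dp0.getD s 0 * (ind1 Tm M s t - indJ Tm M s t) ∧
      psum (gInner Tm M dp0 dp1 st s).2 t
        = psum st.2 t + dp0.getD s 0 * indJ Tm M s t + dp1.getD s 0 * ind1 Tm M s t := by
  have hs0 : (0:Int) ≤ (s:Int) := by omega
  have hidx0 : (0:Int) ≤ (s:Int) + M := by omega
  by_cases hz : dp0.getD s 0 = 0 ∧ dp1.getD s 0 = 0
  · have hres : gInner Tm M dp0 dp1 st s = st := by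
      simp only [gInner]
      rw [if_pos hz]
    rw [hres]
    refine ⟨h1, h2, ?_⟩
    intro t ht
    rw [hz.1, hz.2]
    constructor <;> ring
  · by_cases hlh : (s:Int) ≤ (s:Int) + min M (Tm - (s:Int))
    · by_cases hv0 : dp0.getD s 0 ≠ 0
      · by_cases hMc : min M (Tm - (s:Int)) ≥ M
        · -- v0 branch with the M-index move
          by_cases hv1 : dp1.getD s 0 ≠ 0
          · have hres : gInner Tm M dp0 dp1 st s =
                (rangeAdd Tm (rangeAdd Tm st.1 (s:Int) ((s:Int) + min M (Tm - (s:Int))) (dp0.getD s 0)) ((s:Int) + M) ((s:Int) + M) (-(dp0.getD s 0)),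
                 rangeAdd Tm (rangeAdd Tm st.2 ((s:Int) + M) ((s:Int) + M) (dp0.getD s 0)) (s:Int) ((s:Int) + min M (Tm - (s:Int))) (dp1.getD s 0)) := by
              simp only [gInner]
              rw [if_neg hz, if_pos hlh, if_pos hv0, if_pos hMc, if_pos hv1]
            rw [hres]
            refine ⟨by simp [length_rangeAdd, h1], by simp [length_rangeAdd, h2], ?_⟩
            intro t ht
            have l1 : (rangeAdd Tm st.1 (s:Int) ((s:Int) + min M (Tm - (s:Int))) (dp0.getD s 0)).length = (Tm+2).toNat := by
              rw [length_rangeAdd, h1]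
            have l2 : (rangeAdd Tm st.2 ((s:Int) + M) ((s:Int) + M) (dp0.getD s 0)).length = (Tm+2).toNat := by
              rw [length_rangeAdd, h2]
            rw [psum_rangeAdd Tm _ _ _ _ hidx0 l1 hT t ht,
              psum_rangeAdd Tm st.1 _ _ _ hs0 h1 hT t ht,
              psum_rangeAdd Tm _ _ _ _ hs0 l2 hT t ht,
              psum_rangeAdd Tm st.2 _ _ _ hidx0 h2 hT t ht]
            unfold ind1 indJ
            constructor <;> (split_ifs <;> (try ring) <;> exfalso <;> omega)
          · have hres : gInner Tm M dp0 dp1 st s =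
                (rangeAdd Tm (rangeAdd Tm st.1 (s:Int) ((s:Int) + min M (Tm - (s:Int))) (dp0.getD s 0)) ((s:Int) + M) ((s:Int) + M) (-(dp0.getD s 0)),
                 rangeAdd Tm st.2 ((s:Int) + M) ((s:Int) + M) (dp0.getD s 0)) := by
              simp only [gInner]
              rw [if_neg hz, if_pos hlh, if_pos hv0, if_pos hMc, if_neg (fun h => h (by omega : dp1.getD s 0 = 0))]
            rw [hres]
            refine ⟨by simp [length_rangeAdd, h1], by simp [length_rangeAdd, h2], ?_⟩
            intro t ht
            have hv1e : dp1.getD s 0 = 0 := by omega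
            have l1 : (rangeAdd Tm st.1 (s:Int) ((s:Int) + min M (Tm - (s:Int))) (dp0.getD s 0)).length = (Tm+2).toNat := by
              rw [length_rangeAdd, h1]
            rw [psum_rangeAdd Tm _ _ _ _ hidx0 l1 hT t ht,
              psum_rangeAdd Tm st.1 _ _ _ hs0 h1 hT t ht,
              psum_rangeAdd Tm st.2 _ _ _ hidx0 h2 hT t ht, hv1e]
            unfold ind1 indJ
            constructor <;> (split_ifs <;> (try ring) <;> exfalso <;> omega)
        · -- v0 branch without the M-index move
          by_cases hv1 : dp1.getD s 0 ≠ 0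
          · have hres : gInner Tm M dp0 dp1 st s =
                (rangeAdd Tm st.1 (s:Int) ((s:Int) + min M (Tm - (s:Int))) (dp0.getD s 0),
                 rangeAdd Tm st.2 (s:Int) ((s:Int) + min M (Tm - (s:Int))) (dp1.getD s 0)) := by
              simp only [gInner]
              rw [if_neg hz, if_pos hlh, if_pos hv0, if_neg hMc, if_pos hv1]
            rw [hres]
            refine ⟨by simp [length_rangeAdd, h1], by simp [length_rangeAdd, h2], ?_⟩
            intro t ht
            rw [psum_rangeAdd Tm st.1 _ _ _ hs0 h1 hT t ht,
              psum_rangeAdd Tm st.2 _ _ _ hs0 h2 hT t ht]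
            unfold ind1 indJ
            constructor <;> (split_ifs <;> (try ring) <;> exfalso <;> omega)
          · have hres : gInner Tm M dp0 dp1 st s =
                (rangeAdd Tm st.1 (s:Int) ((s:Int) + min M (Tm - (s:Int))) (dp0.getD s 0), st.2) := by
              simp only [gInner]
              rw [if_neg hz, if_pos hlh, if_pos hv0, if_neg hMc, if_neg (fun h => h (by omega : dp1.getD s 0 = 0))]
            rw [hres]
            refine ⟨by simp [length_rangeAdd, h1], h2, ?_⟩
            intro t ht
            have hv1e : dp1.getD s 0 = 0 := by omega
            rw [psum_rangeAdd Tm st.1 _ _ _ hs0 h1 hT t ht, hv1e]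
            unfold ind1 indJ
            constructor <;> (split_ifs <;> (try ring) <;> exfalso <;> omega)
      · -- v0 = 0, so v1 ≠ 0
        have hv0e : dp0.getD s 0 = 0 := by omega
        have hv1 : dp1.getD s 0 ≠ 0 := fun h => hz ⟨hv0e, h⟩
        have hres : gInner Tm M dp0 dp1 st s =
            (st.1, rangeAdd Tm st.2 (s:Int) ((s:Int) + min M (Tm - (s:Int))) (dp1.getD s 0)) := by
          simp only [gInner]
          rw [if_neg hz, if_pos hlh, if_neg hv0, if_pos hv1]
        rw [hres]
        refine ⟨h1, by simp [length_rangeAdd, h2], ?_⟩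
        intro t ht
        rw [psum_rangeAdd Tm st.2 _ _ _ hs0 h2 hT t ht, hv0e]
        unfold ind1 indJ
        constructor <;> (split_ifs <;> (try ring) <;> exfalso <;> omega)
    · have hres : gInner Tm M dp0 dp1 st s = st := by
        simp only [gInner]
        rw [if_neg hz, if_neg hlh]
      rw [hres]
      refine ⟨h1, h2, ?_⟩
      intro t ht
      have i1 : ind1 Tm M s t = 0 := by
        unfold ind1
        rw [if_neg (by omega)]
      have i2 : indJ Tm M s t = 0 := by
        unfold indJ
        rw [if_neg (by omega)]
      rw [i1, i2]
      constructor <;> ring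

theorem foldl_gInner_spec (Tm M : Int) (hM : 0 ≤ M) (hT : 0 ≤ Tm)
    (dp0 dp1 : List Int) (ss : List Nat) (hss : ∀ s ∈ ss, (s:Int) ≤ Tm)
    (st : List Int × List Int)
    (h1 : st.1.length = (Tm+2).toNat) (h2 : st.2.length = (Tm+2).toNat) :
    (ss.foldl (gInner Tm M dp0 dp1) st).1.length = (Tm+2).toNat ∧
    (ss.foldl (gInner Tm M dp0 dp1) st).2.length = (Tm+2).toNat ∧
    ∀ t : Nat, (t:Int) ≤ Tm →
      psum (ss.foldl (gInner Tm M dp0 dp1) st).1 t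
        = psum st.1 t + (ss.map (fun s => dp0.getD s 0 * (ind1 Tm M s t - indJ Tm M s t))).sum ∧
      psum (ss.foldl (gInner Tm M dp0 dp1) st).2 t
        = psum st.2 t + (ss.map (fun s => dp0.getD s 0 * indJ Tm M s t + dp1.getD s 0 * ind1 Tm M s t)).sum := by
  induction ss generalizing st with
  | nil =>
    refine ⟨h1, h2, ?_⟩
    intro t _
    simp
  | cons s tl ih =>
    have hsTm : (s:Int) ≤ Tm := hss s (by simp)
    obtain ⟨g1, g2, g3⟩ := gInner_spec Tm M hM hT dp0 dp1 st h1 h2 s hsTm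
    obtain ⟨j1, j2, j3⟩ := ih (fun x hx => hss x (by simp [hx])) (gInner Tm M dp0 dp1 st s) g1 g2
    refine ⟨j1, j2, ?_⟩
    intro t ht
    obtain ⟨e1, e2⟩ := g3 t ht
    obtain ⟨f1, f2⟩ := j3 t ht
    constructor
    · rw [List.foldl_cons] at *; rw [f1, e1]; simp; ring
    · rw [List.foldl_cons] at *; rw [f2, e2]; simp; ring

theorem getD_concat (xs : List Int) (c : Int) (t : Nat) :
    (xs ++ [c]).getD t 0 = if t < xs.length then xs.getD t 0 else if t = xs.length then c else 0 := by
  rcases lt_trichotomy t xs.length with h | h | h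
  · rw [if_pos h, List.getD_eq_getElem?_getD, List.getD_eq_getElem?_getD,
      List.getElem?_append_left h]
  · subst h
    simp
  · rw [if_neg (by omega), if_neg (by omega), List.getD_eq_getElem?_getD,
      List.getElem?_eq_none (by simp; omega)]
    rfl

theorem prefixAux (d : List Int) (n : Nat) :
    ((List.range n).foldl
      (fun (acc : List Int × Int) i =>
        (acc.1 ++ [acc.2 + d.getD i 0], acc.2 + d.getD i 0)) ([], 0)).1.length = n ∧
    ((List.range n).foldl
      (fun (acc : List Int × Int) i =>
        (acc.1 ++ [acc.2 + d.getD i 0], acc.2 + d.getD i 0)) ([], 0)).2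
      = ∑ j ∈ Finset.range n, d.getD j 0 ∧
    ∀ t, t < n →
      ((List.range n).foldl
        (fun (acc : List Int × Int) i =>
          (acc.1 ++ [acc.2 + d.getD i 0], acc.2 + d.getD i 0)) ([], 0)).1.getD t 0 = psum d t := by
  induction n with
  | zero => exact ⟨rfl, by simp, fun t ht => by omega⟩
  | succ n ih =>
    obtain ⟨ih1, ih2, ih3⟩ := ih
    rw [List.range_succ, List.foldl_append, List.foldl_cons, List.foldl_nil]
    refine ⟨?_, ?_, ?_⟩
    · simp only [List.length_append, List.length_cons, List.length_nil, ih1]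
    · rw [Finset.sum_range_succ, ← ih2]
    · intro t ht
      rw [getD_concat, ih1]
      rcases Nat.lt_or_ge t n with h | h
      · rw [if_pos h]
        exact ih3 t h
      · have htn : t = n := by omega
        rw [if_neg (by omega), if_pos htn, htn, ih2]
        unfold psum
        rw [Finset.sum_range_succ]

theorem prefixLoop_spec (Tm : Int) (d : List Int) :
    (prefixLoop Tm d).length = (Tm+1).toNat ∧
    ∀ t, t < (Tm+1).toNat → (prefixLoop Tm d).getD t 0 = psum d t := by
  obtain ⟨a, _, b⟩ := prefixAux d (Tm+1).toNat
  exact ⟨a, b⟩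

theorem getD_replicate_zero (n : Nat) (t : Nat) :
    (List.replicate n (0:Int)).getD t 0 = 0 := by
  rcases Nat.lt_or_ge t n with h | h
  · rw [List.getD_eq_getElem?_getD, List.getElem?_replicate, if_pos h]
    rfl
  · rw [List.getD_eq_getElem?_getD,
      List.getElem?_eq_none (by simpa using h)]
    rfl

theorem psum_zero_init (Tm : Int) (t : Nat) :
    psum (List.replicate (Tm+2).toNat (0:Int)) t = 0 := by
  unfold psum
  apply Finset.sum_eq_zero
  intro j _
  exact getD_replicate_zero _ j

theorem gRound_spec (Tm M : Int) (hM : 0 ≤ M) (hT : 0 ≤ Tm) (st : List Int × List Int) :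
    (gRound Tm M st).1.length = (Tm+1).toNat ∧
    (gRound Tm M st).2.length = (Tm+1).toNat ∧
    ∀ t : Nat, (t:Int) ≤ Tm →
      (gRound Tm M st).1.getD t 0
        = ∑ s ∈ Finset.range (Tm+1).toNat, st.1.getD s 0 * (ind1 Tm M s t - indJ Tm M s t) ∧
      (gRound Tm M st).2.getD t 0
        = ∑ s ∈ Finset.range (Tm+1).toNat,
            (st.1.getD s 0 * indJ Tm M s t + st.2.getD s 0 * ind1 Tm M s t) := by
  have hss : ∀ x ∈ List.range (Tm+1).toNat, ((x:Nat):Int) ≤ Tm := by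
    intro x hx
    rw [List.mem_range] at hx
    omega
  obtain ⟨F1, F2, F3⟩ := foldl_gInner_spec Tm M hM hT st.1 st.2 (List.range (Tm+1).toNat) hss
    (List.replicate (Tm+2).toNat 0, List.replicate (Tm+2).toNat 0)
    (by simp) (by simp)
  have G1 := prefixLoop_spec Tm ((List.range (Tm+1).toNat).foldl (gInner Tm M st.1 st.2)
    (List.replicate (Tm+2).toNat 0, List.replicate (Tm+2).toNat 0)).1
  have G2 := prefixLoop_spec Tm ((List.range (Tm+1).toNat).foldl (gInner Tm M st.1 st.2)
    (List.replicate (Tm+2).toNat 0, List.replicate (Tm+2).toNat 0)).2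
  refine ⟨G1.1, G2.1, ?_⟩
  intro t ht
  have htn : t < (Tm+1).toNat := by omega
  obtain ⟨E1, E2⟩ := F3 t ht
  constructor
  · rw [show (gRound Tm M st).1 = prefixLoop Tm ((List.range (Tm+1).toNat).foldl (gInner Tm M st.1 st.2)
      (List.replicate (Tm+2).toNat 0, List.replicate (Tm+2).toNat 0)).1 from rfl]
    rw [G1.2 t htn, E1, psum_zero_init, sum_map_range]
    ring
  · rw [show (gRound Tm M st).2 = prefixLoop Tm ((List.range (Tm+1).toNat).foldl (gInner Tm M st.1 st.2)
      (List.replicate (Tm+2).toNat 0, List.replicate (Tm+2).toNat 0)).2 from rfl]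
    rw [G2.2 t htn, E2, psum_zero_init, sum_map_range]
    ring

theorem ind_sub (Tm M : Int) (hM : 0 ≤ M) (s t : Nat) :
    ind1 Tm M s t - indJ Tm M s t = ind1 Tm (M-1) s t := by
  unfold ind1 indJ
  split_ifs <;> omega

theorem sum_indJ (Tm M : Int) (hM : 0 ≤ M) (a : Nat → Int) (t : Nat) (ht : (t:Int) ≤ Tm) :
    ∑ s ∈ Finset.range (Tm+1).toNat, a s * indJ Tm M s t
      = if (M:Int) ≤ (t:Int) then a (t - M.toNat) else 0 := by
  by_cases hMt : (M:Int) ≤ (t:Int)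
  · rw [if_pos hMt]
    have h1 : ∑ s ∈ Finset.range (Tm+1).toNat, a s * indJ Tm M s t
        = ∑ s ∈ Finset.range (Tm+1).toNat, (if s = t - M.toNat then a s else 0) := by
      apply Finset.sum_congr rfl
      intro s hs
      rw [Finset.mem_range] at hs
      unfold indJ
      have hc : (min M (Tm - (s:Int)) ≥ M ∧ (t:Int) = (s:Int) + M) ↔ (s = t - M.toNat) := by
        omega
      simp only [hc]
      split_ifs <;> ring
    rw [h1, Finset.sum_ite_eq' (Finset.range (Tm+1).toNat) (t - M.toNat) a,
      if_pos (Finset.mem_range.mpr (by omega))]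
  · rw [if_neg hMt]
    apply Finset.sum_eq_zero
    intro s _
    unfold indJ
    rw [if_neg (by omega), mul_zero]

theorem conv_c_form (Tm cap : Int) (hT : 0 ≤ Tm) (a : Nat → Int) (t : Nat) (ht : (t:Int) ≤ Tm) :
    ∑ s ∈ Finset.range (Tm+1).toNat, a s * ind1 Tm cap s t
      = ∑ c ∈ Finset.range ((min cap (t:Int)) + 1).toNat, a (t - c) := by
  have e1 : ∑ s ∈ Finset.range (t+1), a s * ind1 Tm cap s t
      = ∑ s ∈ Finset.range (Tm+1).toNat, a s * ind1 Tm cap s t := by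
    have hsub : Finset.range (t+1) ⊆ Finset.range (Tm+1).toNat := by
      intro x hx
      rw [Finset.mem_range] at hx ⊢
      omega
    apply Finset.sum_subset hsub
    intro x hx hnx
    rw [Finset.mem_range] at hx hnx
    unfold ind1
    rw [if_neg (by omega), mul_zero]
  rw [← e1]
  have e2 : ∑ s ∈ Finset.range (t+1), a s * ind1 Tm cap s t
      = ∑ c ∈ Finset.range (t+1), a (t - c) * ind1 Tm cap (t - c) t :=
    (Finset.sum_range_reflect (fun s => a s * ind1 Tm cap s t) (t+1)).symm
  rw [e2]
  have e3 : ∑ c ∈ Finset.range (t+1), a (t - c) * ind1 Tm cap (t - c) t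
      = ∑ c ∈ Finset.range (t+1), (if (c:Int) ≤ cap then a (t - c) else 0) := by
    apply Finset.sum_congr rfl
    intro c hc
    rw [Finset.mem_range] at hc
    unfold ind1
    have hi : (((t - c : Nat):Int) ≤ (t:Int) ∧ (t:Int) ≤ ((t - c : Nat):Int) + min cap (Tm - ((t - c : Nat):Int))) ↔ ((c:Int) ≤ cap) := by
      omega
    simp only [hi]
    split_ifs <;> ring
  rw [e3]
  have e4 : ∑ c ∈ Finset.range ((min cap (t:Int)) + 1).toNat, (if (c:Int) ≤ cap then a (t - c) else 0)
      = ∑ c ∈ Finset.range (t+1), (if (c:Int) ≤ cap then a (t - c) else 0) := by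
    have hsub : Finset.range ((min cap (t:Int)) + 1).toNat ⊆ Finset.range (t+1) := by
      intro x hx
      rw [Finset.mem_range] at hx ⊢
      omega
    apply Finset.sum_subset hsub
    intro x hx hnx
    rw [Finset.mem_range] at hx hnx
    rw [if_neg (by omega)]
  rw [← e4]
  apply Finset.sum_congr rfl
  intro c hc
  rw [Finset.mem_range] at hc
  rw [if_pos (by omega)]

theorem range_split (M : Int) (hM : 0 ≤ M) (t : Nat) (h : Nat → Int) :
    ∑ c ∈ Finset.range ((min M (t:Int)) + 1).toNat, h c
      = (∑ c ∈ Finset.range ((min (M-1) (t:Int)) + 1).toNat, h c)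
        + (if (M:Int) ≤ (t:Int) then h M.toNat else 0) := by
  by_cases hMt : (M:Int) ≤ (t:Int)
  · have e1 : ((min M (t:Int)) + 1).toNat = M.toNat + 1 := by omega
    have e2 : ((min (M-1) (t:Int)) + 1).toNat = M.toNat := by omega
    rw [e1, e2, Finset.sum_range_succ, if_pos hMt]
  · have e1 : ((min M (t:Int)) + 1).toNat = ((min (M-1) (t:Int)) + 1).toNat := by omega
    rw [e1, if_neg hMt]
    ring

theorem getD_map_range (n : Nat) (f : Nat → Int) (t : Nat) :
    ((List.range n).map f).getD t 0 = if t < n then f t else 0 := by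
  by_cases h : t < n
  · rw [if_pos h, List.getD_eq_getElem?_getD, List.getElem?_map,
      List.getElem?_range h]
    rfl
  · rw [if_neg h, List.getD_eq_getElem?_getD, List.getElem?_eq_none (by simpa using h)]
    rfl

theorem psum_window (tbl : List Int) (cap : Int) (hcap : -1 ≤ cap) (T : Nat) :
    psum tbl T - (if (T : Int) - cap - 1 ≥ 0 then psum tbl ((T : Int) - cap - 1).toNat else 0)
      = ∑ c ∈ Finset.range ((min cap (T:Int)) + 1).toNat, tbl.getD (T - c) 0 := by
  have hR : ∑ c ∈ Finset.range ((min cap (T:Int)) + 1).toNat, tbl.getD (T - c) 0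
      = ∑ c ∈ Finset.range (T+1), (if (c:Int) ≤ cap then tbl.getD (T - c) 0 else 0) := by
    have hsub : Finset.range ((min cap (T:Int)) + 1).toNat ⊆ Finset.range (T+1) := by
      intro x hx
      rw [Finset.mem_range] at hx ⊢
      omega
    rw [← Finset.sum_subset hsub]
    · apply Finset.sum_congr rfl
      intro c hc
      rw [Finset.mem_range] at hc
      rw [if_pos (by omega)]
    · intro x hx hnx
      rw [Finset.mem_range] at hx hnx
      rw [if_neg (by omega)]
  have hRef : ∑ c ∈ Finset.range (T+1), (if (c:Int) ≤ cap then tbl.getD (T - c) 0 else 0)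
      = ∑ u ∈ Finset.range (T+1), (if (T:Int) - (u:Int) ≤ cap then tbl.getD u 0 else 0) := by
    rw [← Finset.sum_range_reflect (fun c => if (c:Int) ≤ cap then tbl.getD (T - c) 0 else 0) (T+1)]
    apply Finset.sum_congr rfl
    intro u hu
    rw [Finset.mem_range] at hu
    have h1 : T + 1 - 1 - u = T - u := by omega
    rw [h1]
    have h2 : (((T - u : Nat)):Int) ≤ cap ↔ (T:Int) - (u:Int) ≤ cap := by omega
    simp only [h2]
    have h3 : T - (T - u) = u := by omega
    rw [h3]
  rw [hR, hRef]
  by_cases hc : (T : Int) - cap - 1 ≥ 0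
  · rw [if_pos hc]
    unfold psum
    have hsub : Finset.range (((T : Int) - cap - 1).toNat + 1) ⊆ Finset.range (T+1) := by
      intro x hx
      rw [Finset.mem_range] at hx ⊢
      omega
    have h4 : ∑ j ∈ Finset.range (((T : Int) - cap - 1).toNat + 1), tbl.getD j 0
        = ∑ j ∈ Finset.range (T+1), (if j < ((T : Int) - cap - 1).toNat + 1 then tbl.getD j 0 else 0) := by
      rw [← Finset.sum_subset hsub]
      · apply Finset.sum_congr rfl
        intro j hj
        rw [Finset.mem_range] at hj
        rw [if_pos hj]
      · intro x hx hnx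
        rw [Finset.mem_range] at hx hnx
        rw [if_neg (by omega)]
    rw [h4, ← Finset.sum_sub_distrib]
    apply Finset.sum_congr rfl
    intro u hu
    rw [Finset.mem_range] at hu
    split_ifs <;> (try ring) <;> exfalso <;> omega
  · rw [if_neg hc, sub_zero]
    unfold psum
    apply Finset.sum_congr rfl
    intro u hu
    rw [Finset.mem_range] at hu
    rw [if_pos (by omega)]

theorem windowRound (tHi cap : Int) (hcap : -1 ≤ cap) (h0 : 0 ≤ tHi)
    (table : List Int) (t : Nat) (ht : (t:Int) ≤ tHi) :
    ((List.range (tHi + 1).toNat).map (fun (T : Nat) =>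
      (((List.range (tHi + 1).toNat).foldl
        (fun (acc : List Int × Int) T' =>
          (acc.1 ++ [acc.2 + table.getD T' 0], acc.2 + table.getD T' 0)) ([], 0)).1.getD T 0 -
        (if (T : Int) - cap - 1 ≥ 0 then
          ((List.range (tHi + 1).toNat).foldl
            (fun (acc : List Int × Int) T' =>
              (acc.1 ++ [acc.2 + table.getD T' 0], acc.2 + table.getD T' 0)) ([], 0)).1.getD
            ((T : Int) - cap - 1).toNat 0
        else 0)))).getD t 0
    = ∑ c ∈ Finset.range ((min cap (t:Int)) + 1).toNat, table.getD (t - c) 0 := by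
  obtain ⟨p1, _, p3⟩ := prefixAux table (tHi + 1).toNat
  rw [getD_map_range, if_pos (by omega), p3 t (by omega)]
  have hif : (if (t : Int) - cap - 1 ≥ 0 then
      ((List.range (tHi + 1).toNat).foldl
        (fun (acc : List Int × Int) T' =>
          (acc.1 ++ [acc.2 + table.getD T' 0], acc.2 + table.getD T' 0)) ([], 0)).1.getD
        ((t : Int) - cap - 1).toNat 0
      else 0)
      = (if (t : Int) - cap - 1 ≥ 0 then psum table ((t : Int) - cap - 1).toNat else 0) := by
    by_cases hc : (t : Int) - cap - 1 ≥ 0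
    · rw [if_pos hc, if_pos hc, p3 ((t : Int) - cap - 1).toNat (by omega)]
    · rw [if_neg hc, if_neg hc]
  rw [hif, psum_window table cap hcap t]

theorem boundedParts_spec (tHi cap parts : Int) (h : 0 ≤ tHi) (hcap : -1 ≤ cap) :
    (boundedParts tHi cap parts).length = (tHi+1).toNat ∧
    ∀ t : Nat, (t:Int) ≤ tHi →
      (boundedParts tHi cap parts).getD t 0 = mathF cap (max parts 0).toNat t := by
  have aux : ∀ j : Nat,
      ((List.range j).foldl
        (fun (table : List Int) _ =>
          (List.range (tHi + 1).toNat).map (fun (T : Nat) =>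
            (((List.range (tHi + 1).toNat).foldl
              (fun (acc : List Int × Int) T' =>
                (acc.1 ++ [acc.2 + table.getD T' 0], acc.2 + table.getD T' 0)) ([], 0)).1.getD T 0 -
              (if (T : Int) - cap - 1 ≥ 0 then
                ((List.range (tHi + 1).toNat).foldl
                  (fun (acc : List Int × Int) T' =>
                    (acc.1 ++ [acc.2 + table.getD T' 0], acc.2 + table.getD T' 0)) ([], 0)).1.getD
                  ((T : Int) - cap - 1).toNat 0
              else 0))))
        ((1:Int) :: List.replicate tHi.toNat 0)).length = (tHi+1).toNat ∧
      ∀ t : Nat, (t:Int) ≤ tHi →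
        ((List.range j).foldl
          (fun (table : List Int) _ =>
            (List.range (tHi + 1).toNat).map (fun (T : Nat) =>
              (((List.range (tHi + 1).toNat).foldl
                (fun (acc : List Int × Int) T' =>
                  (acc.1 ++ [acc.2 + table.getD T' 0], acc.2 + table.getD T' 0)) ([], 0)).1.getD T 0 -
                (if (T : Int) - cap - 1 ≥ 0 then
                  ((List.range (tHi + 1).toNat).foldl
                    (fun (acc : List Int × Int) T' =>
                      (acc.1 ++ [acc.2 + table.getD T' 0], acc.2 + table.getD T' 0)) ([], 0)).1.getD
                    ((T : Int) - cap - 1).toNat 0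
                else 0))))
          ((1:Int) :: List.replicate tHi.toNat 0)).getD t 0 = mathF cap j t := by
    intro j
    induction j with
    | zero =>
      refine ⟨by simp; omega, ?_⟩
      intro t ht
      cases t with
      | zero => rfl
      | succ m =>
        show (List.replicate tHi.toNat (0:Int)).getD m 0 = mathF cap 0 (m+1)
        rw [getD_replicate_zero]
        rfl
    | succ j ih =>
      obtain ⟨ih1, ih2⟩ := ih
      simp only [List.range_succ, List.foldl_append, List.foldl_cons, List.foldl_nil]
      refine ⟨by simp, ?_⟩
      intro t ht
      rw [windowRound tHi cap hcap h _ t ht]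
      show _ = mathF cap (j+1) t
      rw [mathF]
      apply Finset.sum_congr rfl
      intro c _
      exact ih2 (t - c) (by omega)
  obtain ⟨a1, a2⟩ := aux (max parts 0).toNat
  simp only [boundedParts]
  exact ⟨a1, a2⟩

theorem g_rounds_spec (Tm M : Int) (hM : 0 ≤ M) (hT : 0 ≤ Tm) (j : Nat) :
    ∀ t : Nat, (t:Int) ≤ Tm →
      ((List.range j).foldl (fun st _ => gRound Tm M st)
        ((List.replicate (Tm+1).toNat 0).set 0 1, List.replicate (Tm+1).toNat 0)).1.getD t 0
        = mathF (M-1) j t ∧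
      ((List.range j).foldl (fun st _ => gRound Tm M st)
        ((List.replicate (Tm+1).toNat 0).set 0 1, List.replicate (Tm+1).toNat 0)).2.getD t 0
        = mathF M j t - mathF (M-1) j t := by
  induction j with
  | zero =>
    intro t ht
    constructor
    · simp only [List.range_zero, List.foldl_nil]
      rcases Nat.eq_zero_or_pos t with h0 | h0
      · subst h0
        rw [List.getD_eq_getElem?_getD, List.getElem?_set_self (by simp; omega)]
        rfl
      · rw [List.getD_eq_getElem?_getD, List.getElem?_set_ne (by omega)]
        have : (List.replicate (Tm+1).toNat (0:Int)).getD t 0 = 0 := getD_replicate_zero _ t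
        rw [List.getD_eq_getElem?_getD] at this
        rw [this]
        unfold mathF
        rw [if_neg (by omega)]
    · simp only [List.range_zero, List.foldl_nil]
      rw [getD_replicate_zero]
      unfold mathF
      ring
  | succ j ih =>
    intro t ht
    simp only [List.range_succ, List.foldl_append, List.foldl_cons, List.foldl_nil]
    obtain ⟨_, _, hR⟩ := gRound_spec Tm M hM hT
      ((List.range j).foldl (fun st _ => gRound Tm M st)
        ((List.replicate (Tm+1).toNat 0).set 0 1, List.replicate (Tm+1).toNat 0))
    obtain ⟨r1, r2⟩ := hR t ht
    constructor
    · rw [r1]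
      have c1 : ∑ s ∈ Finset.range (Tm+1).toNat,
          ((List.range j).foldl (fun st _ => gRound Tm M st)
            ((List.replicate (Tm+1).toNat 0).set 0 1, List.replicate (Tm+1).toNat 0)).1.getD s 0
            * (ind1 Tm M s t - indJ Tm M s t)
          = ∑ s ∈ Finset.range (Tm+1).toNat, mathF (M-1) j s * ind1 Tm (M-1) s t := by
        apply Finset.sum_congr rfl
        intro s hs
        rw [Finset.mem_range] at hs
        rw [(ih s (by omega)).1, ind_sub Tm M hM]
      rw [c1, conv_c_form Tm (M-1) hT _ t ht]
      rw [mathF]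
    · rw [r2]
      have c2 : ∑ s ∈ Finset.range (Tm+1).toNat,
          (((List.range j).foldl (fun st _ => gRound Tm M st)
            ((List.replicate (Tm+1).toNat 0).set 0 1, List.replicate (Tm+1).toNat 0)).1.getD s 0 * indJ Tm M s t
          + ((List.range j).foldl (fun st _ => gRound Tm M st)
            ((List.replicate (Tm+1).toNat 0).set 0 1, List.replicate (Tm+1).toNat 0)).2.getD s 0 * ind1 Tm M s t)
          = ∑ s ∈ Finset.range (Tm+1).toNat,
            (mathF (M-1) j s * indJ Tm M s t
              + (mathF M j s * ind1 Tm M s t - mathF (M-1) j s * ind1 Tm M s t)) := by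
        apply Finset.sum_congr rfl
        intro s hs
        rw [Finset.mem_range] at hs
        rw [(ih s (by omega)).1, (ih s (by omega)).2]
        ring
      rw [c2]
      rw [Finset.sum_add_distrib, Finset.sum_sub_distrib]
      rw [sum_indJ Tm M hM _ t ht, conv_c_form Tm M hT _ t ht, conv_c_form Tm M hT _ t ht]
      have hsplit := range_split M hM t (fun c => mathF (M-1) j (t - c))
      have hm1 : mathF M (j+1) t = ∑ c ∈ Finset.range ((min M (t:Int)) + 1).toNat, mathF M j (t - c) := by
        rw [mathF]
      have hm2 : mathF (M-1) (j+1) t = ∑ c ∈ Finset.range ((min (M-1) (t:Int)) + 1).toNat, mathF (M-1) j (t - c) := by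
        rw [mathF]
      rw [hm1, hm2]
      by_cases hMt : (M:Int) ≤ (t:Int)
      · rw [if_pos hMt] at hsplit ⊢
        linarith [hsplit]
      · rw [if_neg hMt] at hsplit ⊢
        linarith [hsplit]

theorem g_count_spec (Tm M r : Int) (hM : 0 ≤ M) (hT : 0 ≤ Tm) (t : Nat) (ht : (t:Int) ≤ Tm) :
    (g_count_T_M_r Tm M r).getD t 0
      = (boundedParts Tm M r).getD t 0 - (boundedParts Tm (M-1) r).getD t 0 := by
  rw [(boundedParts_spec Tm M r hT (by omega)).2 t ht, (boundedParts_spec Tm (M-1) r hT (by omega)).2 t ht,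
    show (max r 0).toNat = r.toNat from by omega]
  unfold g_count_T_M_r
  by_cases hr : r = 0
  · rw [if_pos hr, hr, getD_replicate_zero]
    have e : ∀ cap : Int, mathF cap (0:Int).toNat t = if t = 0 then 1 else 0 := fun cap => rfl
    rw [e, e]
    ring
  · rw [if_neg hr]
    exact ((g_rounds_spec Tm M hM hT r.toNat t ht).2)

-- ===== VERDICT (by name: the statement is the Claim_ definition above) =====
theorem count_by_M_T_spec : Claim_equal_count_by_M_T := by
  intro n N K_set _
  unfold Spec_count_by_M_T
  simp only [count_by_M_T, count_by_M_T_alt]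
  by_cases hk0 : (K_set.length : Int) = 0
  · rw [if_pos hk0, if_pos (Or.inl hk0)]
  · by_cases hkn : (K_set.length : Int) = n
    · rw [if_neg hk0, if_pos hkn, if_pos (Or.inr hkn)]
    · rw [if_neg hk0, if_neg hkn, if_neg (not_or.mpr ⟨hk0, hkn⟩)]
      by_cases hMm : PySem.Int.floordiv N (K_set.length : Int) - 1 < 0
      · rw [if_pos hMm, if_pos hMm]
      · rw [if_neg hMm, if_neg hMm]
        apply PySem.List.foldl_congr_mem
        intro total Mn hMn
        by_cases hsk : min ((n - (K_set.length : Int)) * (Mn : Int))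
            (N - (K_set.length : Int) * ((Mn : Int) + 1)) < (Mn : Int)
        · rw [if_pos hsk, if_pos hsk]
        · rw [if_neg hsk, if_neg hsk]
          apply PySem.List.foldl_congr_mem
          intro tot i hi
          rw [List.mem_range] at hi
          have hTle : ((Mn : Int) + (i : Int)) ≤ min ((n - (K_set.length : Int)) * (Mn : Int))
              (N - (K_set.length : Int) * ((Mn : Int) + 1)) := by omega
          have hR : (0:Int) ≤ N - (K_set.length : Int) * ((Mn : Int) + 1) - ((Mn : Int) + (i : Int)) := by
            omega
          rw [if_neg (by omega), if_pos hR]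
          have hk1 : (1:Int) ≤ (K_set.length : Int) := by omega
          unfold f_stars_and_bars pyComb
          rw [if_neg (by omega), if_neg (by omega)]
          rw [g_count_spec (min ((n - (K_set.length : Int)) * (Mn : Int))
              (N - (K_set.length : Int) * ((Mn : Int) + 1))) (Mn : Int) (n - (K_set.length : Int))
              (by omega) (by omega) ((Mn : Int) + (i : Int)).toNat (by omega)]
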